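-- pv_equiv track=rewrite | github.com/GdePaulo/Google-Kickstart | 2022 - Round F/farmer_new_test3.py | run_solution
-- ===== SOURCE A (Python) =====
-- def run_solution(d, n, x, plants):
--     plants = [(q, l, v, i) for i, (q, l, v) in enumerate(plants)]
--     seeds_left = [q for (q, l, v, i) in plants]
--     highest_value_plants = sorted(plants, key= lambda s:s[2], reverse=True)
--
--     current_plant_type = highest_value_plants[-1]
--
--     current_reward = 0
--
--     for day in reversed(range(1, d + 1)):
--         days_left = d - day
--         best_available_plants = list(filter( lambda p: p[1] <= days_left and seeds_left[p[3]] > 0, highest_value_plants))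
--
--         power_left = x
--         daily_reward = 0
--         current_best_plant_index = 0
--
--         while power_left > 0 and current_best_plant_index < len(best_available_plants):
--             best_plant = best_available_plants[current_best_plant_index]
--             b_q, b_l, b_v, b_i = best_plant
--             seeds = seeds_left[b_i]
--
--             if seeds >= power_left:
--                 seeds_left[b_i] -= power_left
--                 daily_reward += power_left * b_v
--                 power_left = 0
--             else:
--                 power_left -= seeds_left[b_i]
--                 daily_reward += seeds_left[b_i] * b_v
--                 seeds_left[b_i] = 0
--             current_best_plant_index += 1
--
--         current_reward += daily_reward
--     return current_reward
-- ===== SOURCE B (Python) =====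
-- def run_solution(d, n, x, plants):
--     # Segment-batch greedy: instead of simulating each of the d days, group days
--     # between consecutive availability events and consume capacity x*len(segment)
--     # from the value-sorted plants in one pass per segment.
--     pl = [(q, l, v, i) for i, (q, l, v) in enumerate(plants)]
--     order = sorted(pl, key=lambda s: s[2], reverse=True)
--     seeds = [q for (q, l, v) in plants]
--     starts = sorted({l if l > 0 else 0 for (q, l, v) in plants if (l if l > 0 else 0) < d})
--     total = 0
--     for j, s in enumerate(starts):
--         e = starts[j + 1] if j + 1 < len(starts) else d
--         cap = x * (e - s)
--         for (q0, l, v, i) in order: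
--             if cap <= 0:
--                 break
--             if l <= s and seeds[i] > 0:
--                 take = seeds[i] if seeds[i] < cap else cap
--                 seeds[i] -= take
--                 cap -= take
--                 total += take * v
--     return total
-- ===== Notes on version B (the rewrite author's own statement) =====
-- stated objective: faster
-- what changed: B replaces A's loop over all d days (each day filtering and greedily consuming the value-sorted plant list) by one batched consumption per availability segment: between two consecutive distinct grow-times the available set is constant, so B consumes x*(segment length) capacity from the value-sorted list in a single pass, making the cost independent of d.
import Mathlib
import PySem

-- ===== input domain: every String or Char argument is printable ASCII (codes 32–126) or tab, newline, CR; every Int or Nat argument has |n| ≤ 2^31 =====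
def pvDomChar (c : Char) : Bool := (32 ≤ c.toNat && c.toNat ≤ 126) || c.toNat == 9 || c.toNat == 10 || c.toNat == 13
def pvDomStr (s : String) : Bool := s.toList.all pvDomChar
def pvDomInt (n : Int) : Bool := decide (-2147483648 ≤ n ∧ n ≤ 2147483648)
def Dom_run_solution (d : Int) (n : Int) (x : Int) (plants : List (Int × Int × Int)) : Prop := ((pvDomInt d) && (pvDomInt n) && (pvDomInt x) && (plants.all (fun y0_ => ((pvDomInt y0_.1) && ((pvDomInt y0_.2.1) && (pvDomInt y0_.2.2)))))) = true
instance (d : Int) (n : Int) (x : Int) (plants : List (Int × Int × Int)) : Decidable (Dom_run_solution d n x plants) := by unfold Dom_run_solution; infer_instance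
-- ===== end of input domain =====

-- B replaces A's day-by-day simulation with one batched consumption per availability
-- segment (same-cost segments between consecutive distinct growth times), removing the
-- loop over the d individual days.

-- ===== PORT A =====

-- the while-loop of A's day body: walk the filtered list consuming power
def pvWhileA (best : List (Int × Int × Int × Int)) (power : Int) (dr : Int)
    (seeds : List Int) : Int × List Int :=
  match best with
  | [] => (dr, seeds)
  | p :: ps =>
    if power > 0 then
      let s := PySem.List.pyGetD seeds p.2.2.2 0
      if s ≥ power then
        pvWhileA ps 0 (dr + power * p.2.2.1) (PySem.List.pySetD seeds p.2.2.2 (s - power))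
      else
        pvWhileA ps (power - s) (dr + s * p.2.2.1) (PySem.List.pySetD seeds p.2.2.2 0)
    else (dr, seeds)

def run_solution (d : Int) (n : Int) (x : Int) (plants : List (Int × Int × Int)) : Int :=
  let pl := (PySem.List.enumerate plants).map (fun p => (p.2.1, p.2.2.1, p.2.2.2, p.1))
  let seeds_left := pl.map (fun p => p.1)
  let hv := PySem.List.sorted pl (fun s => s.2.2.1) true
  let _current_plant_type := PySem.List.pyGet? hv (-1)   -- raises IndexError on empty plants (→ Pre_)
  let r := ((PySem.List.pyRange 1 (d + 1) 1).reverse).foldl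
    (fun (acc : Int × List Int) day =>
      let days_left := d - day
      let best := hv.filter (fun p => decide (p.2.1 ≤ days_left) && decide (PySem.List.pyGetD acc.2 p.2.2.2 0 > 0))
      let w := pvWhileA best x 0 acc.2
      (acc.1 + w.1, w.2)) (0, seeds_left)
  r.1

-- ===== PORT B =====

-- inner loop of Source B: consume `cap` seeds, in value order, among plants available at
-- segment start `t`, accumulating into `total`
def pvConsB (order : List (Int × Int × Int × Int)) (t : Int) (cap : Int) (total : Int)
    (seeds : List Int) : Int × List Int :=
  match order with
  | [] => (total, seeds)
  | p :: ps =>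
    if cap ≤ 0 then (total, seeds)
    else if p.2.1 ≤ t ∧ PySem.List.pyGetD seeds p.2.2.2 0 > 0 then
      let sd := PySem.List.pyGetD seeds p.2.2.2 0
      let take := if sd < cap then sd else cap
      pvConsB ps t (cap - take) (total + take * p.2.2.1) (PySem.List.pySetD seeds p.2.2.2 (sd - take))
    else pvConsB ps t cap total seeds

-- outer loop of Source B: one consumption per segment [s, next start or d)
def pvSegB (d : Int) (x : Int) (order : List (Int × Int × Int × Int))
    (starts : List Int) (total : Int) (seeds : List Int) : Int × List Int :=
  match starts with
  | [] => (total, seeds)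
  | s :: rest =>
    let e := match rest with | [] => d | s2 :: _ => s2
    let r := pvConsB order s (x * (e - s)) total seeds
    pvSegB d x order rest r.1 r.2

def run_solution_alt (d : Int) (n : Int) (x : Int) (plants : List (Int × Int × Int)) : Int :=
  let pl := (PySem.List.enumerate plants).map (fun p => (p.2.1, p.2.2.1, p.2.2.2, p.1))
  let order := PySem.List.sorted pl (fun s => s.2.2.1) true
  let seeds := plants.map (fun p => p.1)
  let starts := PySem.List.sorted
    (PySem.Set.ofList ((plants.map (fun p => if p.2.1 > 0 then p.2.1 else 0)).filter (fun a => a < d)))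
    (fun a => a) false
  (pvSegB d x order starts 0 seeds).1

-- ===== PRECONDITION & SPEC =====
-- Pre_ excludes only plants = [], where A's `highest_value_plants[-1]` raises IndexError.
def Pre_run_solution (d : Int) (n : Int) (x : Int) (plants : List (Int × Int × Int)) : Prop :=
  plants ≠ []
instance (d : Int) (n : Int) (x : Int) (plants : List (Int × Int × Int)) : Decidable (Pre_run_solution d n x plants) := by unfold Pre_run_solution; infer_instance
def pvWitness_run_solution : Int × Int × Int × (List (Int × Int × Int)) := (3, 2, 2, [(2, 0, 5), (1, 1, 7)])

def Spec_run_solution (d : Int) (n : Int) (x : Int) (plants : List (Int × Int × Int)) (out : Int) : Prop := out = run_solution_alt d n x plants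
instance (d : Int) (n : Int) (x : Int) (plants : List (Int × Int × Int)) (out : Int) : Decidable (Spec_run_solution d n x plants out) := by unfold Spec_run_solution; infer_instance

-- ===== CLAIM (what is proved, stated in full; the proofs are below) =====
def Claim_equal_run_solution : Prop := ∀ (d : Int) (n : Int) (x : Int) (plants : List (Int × Int × Int)), Dom_run_solution d n x plants → Pre_run_solution d n x plants → Spec_run_solution d n x plants (run_solution d n x plants)

-- ===== LEMMAS AND PROOFS =====


-- p : (q, l, v, i); p.2.2.2 is the plant index, p.2.1 the grow time, p.2.2.1 the value

-- bridge lemmas: pyGetD/pySetD at nonnegative indices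
theorem pvGetD_nonneg (xs : List Int) (i : Int) (h : 0 ≤ i) :
    PySem.List.pyGetD xs i 0 = xs.getD i.toNat 0 := by
  have hi : i = ((i.toNat : Nat) : Int) := (Int.toNat_of_nonneg h).symm
  rw [hi, PySem.List.pyGetD_natCast]
  congr 1

theorem pv_getD_setD_ne (xs : List Int) (i j v : Int) (hi : 0 ≤ i) (hj : 0 ≤ j) (hne : j ≠ i) :
    PySem.List.pyGetD (PySem.List.pySetD xs i v) j 0 = PySem.List.pyGetD xs j 0 := by
  rw [PySem.List.pySetD_of_nonneg _ _ hi, pvGetD_nonneg _ _ hj, pvGetD_nonneg _ _ hj]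
  have hnn : i.toNat ≠ j.toNat := by omega
  simp [List.getD_eq_getElem?_getD, List.getElem?_set_ne hnn]

theorem pv_getD_setD_self (xs : List Int) (i v : Int) (hi : 0 ≤ i) (hlen : i < (xs.length : Int)) :
    PySem.List.pyGetD (PySem.List.pySetD xs i v) i 0 = v := by
  rw [PySem.List.pySetD_of_nonneg _ _ hi, pvGetD_nonneg _ _ hi]
  have h : i.toNat < xs.length := by omega
  simp [List.getD_eq_getElem?_getD, List.getElem?_set_self h]

theorem pv_setD_setD (xs : List Int) (i u v : Int) (hi : 0 ≤ i) :
    PySem.List.pySetD (PySem.List.pySetD xs i u) i v = PySem.List.pySetD xs i v := by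
  rw [PySem.List.pySetD_of_nonneg _ _ hi, PySem.List.pySetD_of_nonneg _ _ hi,
    PySem.List.pySetD_of_nonneg _ _ hi, List.set_set]

theorem pv_setD_zero_self (xs : List Int) (i : Int) (hi : 0 ≤ i)
    (h : PySem.List.pyGetD xs i 0 = 0) : PySem.List.pySetD xs i 0 = xs := by
  rw [PySem.List.pySetD_of_nonneg _ _ hi]
  rw [pvGetD_nonneg _ _ hi] at h
  apply List.ext_getElem?
  intro m
  by_cases hm : i.toNat = m
  · subst hm
    by_cases hlt : i.toNat < xs.length
    · have hv : xs[i.toNat] = 0 := by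
        rw [List.getD_eq_getElem?_getD, List.getElem?_eq_getElem hlt] at h
        simpa using h
      rw [List.getElem?_set_self hlt, List.getElem?_eq_getElem hlt, hv]
    · have hlen : (xs.set i.toNat 0).length ≤ i.toNat := by simp; omega
      rw [List.getElem?_eq_none_iff.mpr hlen, List.getElem?_eq_none_iff.mpr (by omega)]
  · rw [List.getElem?_set_ne hm]

theorem pv_length_setD (xs : List Int) (i v : Int) :
    (PySem.List.pySetD xs i v).length = xs.length := PySem.List.length_pySetD ..

-- clean pair form of B's inner loop: (reward, seeds')
def pvCons (os : List (Int × Int × Int × Int)) (t : Int) (c : Int) (seeds : List Int) :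
    Int × List Int :=
  match os with
  | [] => (0, seeds)
  | p :: ps =>
    if c ≤ 0 then (0, seeds)
    else if p.2.1 ≤ t ∧ PySem.List.pyGetD seeds p.2.2.2 0 > 0 then
      let sd := PySem.List.pyGetD seeds p.2.2.2 0
      let take := if sd < c then sd else c
      let r := pvCons ps t (c - take) (PySem.List.pySetD seeds p.2.2.2 (sd - take))
      (take * p.2.2.1 + r.1, r.2)
    else pvCons ps t c seeds

theorem pvConsB_eq (os : List (Int × Int × Int × Int)) (t c total : Int) (seeds : List Int) :
    pvConsB os t c total seeds
      = (total + (pvCons os t c seeds).1, (pvCons os t c seeds).2) := by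
  induction os generalizing c total seeds with
  | nil => simp [pvConsB, pvCons]
  | cons p ps ih =>
    simp only [pvConsB, pvCons]
    by_cases h1 : c ≤ 0
    · simp [h1]
    · simp only [if_neg h1]
      by_cases h2 : p.2.1 ≤ t ∧ PySem.List.pyGetD seeds p.2.2.2 0 > 0
      · simp only [if_pos h2, ih, Prod.ext_iff]
        exact ⟨by ring, by trivial⟩
      · simp only [if_neg h2, ih]

theorem pvCons_nonpos (os : List (Int × Int × Int × Int)) (t c : Int) (seeds : List Int)
    (h : c ≤ 0) : pvCons os t c seeds = (0, seeds) := by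
  cases os with
  | nil => rfl
  | cons p ps => simp [pvCons, h]

theorem pvCons_zero (os : List (Int × Int × Int × Int)) (t : Int) (seeds : List Int) :
    pvCons os t 0 seeds = (0, seeds) := pvCons_nonpos _ _ _ _ (le_refl 0)

theorem pvCons_length (os : List (Int × Int × Int × Int)) (t c : Int) (seeds : List Int) :
    (pvCons os t c seeds).2.length = seeds.length := by
  induction os generalizing c seeds with
  | nil => rfl
  | cons p ps ih =>
    simp only [pvCons]
    by_cases h1 : c ≤ 0
    · simp [h1]
    · simp only [if_neg h1]
      by_cases h2 : p.2.1 ≤ t ∧ PySem.List.pyGetD seeds p.2.2.2 0 > 0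
      · simp only [if_pos h2, ih, pv_length_setD]
      · simp only [if_neg h2, ih]

theorem pvCons_nonpos_preserved (os : List (Int × Int × Int × Int)) (t c : Int)
    (seeds : List Int) (j : Int) (hidx : ∀ p ∈ os, 0 ≤ p.2.2.2) (hj : 0 ≤ j)
    (h : PySem.List.pyGetD seeds j 0 ≤ 0) :
    PySem.List.pyGetD (pvCons os t c seeds).2 j 0 ≤ 0 := by
  induction os generalizing c seeds with
  | nil => exact h
  | cons p ps ih =>
    simp only [pvCons]
    by_cases h1 : c ≤ 0
    · simpa [h1] using h
    · simp only [if_neg h1]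
      by_cases h2 : p.2.1 ≤ t ∧ PySem.List.pyGetD seeds p.2.2.2 0 > 0
      · simp only [if_pos h2]
        have hip : 0 ≤ p.2.2.2 := hidx p (by simp)
        have hne : j ≠ p.2.2.2 := by
          intro he; rw [he] at h; omega
        exact ih _ _ (fun q hq => hidx q (by simp [hq]))
          (by rw [pv_getD_setD_ne _ _ _ _ hip hj hne]; exact h)
      · simp only [if_neg h2]
        exact ih _ _ (fun q hq => hidx q (by simp [hq])) h

theorem pvCons_nop (os : List (Int × Int × Int × Int)) (t c : Int) (seeds : List Int)
    (h : ∀ p ∈ os, ¬ p.2.1 ≤ t) : pvCons os t c seeds = (0, seeds) := by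
  induction os generalizing c seeds with
  | nil => rfl
  | cons p ps ih =>
    have hp : ¬ p.2.1 ≤ t := h p (by simp)
    simp only [pvCons]
    by_cases h1 : c ≤ 0
    · simp [h1]
    · have h2 : ¬ (p.2.1 ≤ t ∧ PySem.List.pyGetD seeds p.2.2.2 0 > 0) := fun hc => hp hc.1
      simp only [if_neg h1, if_neg h2]
      exact ih _ _ (fun q hq => h q (by simp [hq]))

theorem pvCons_congr_t (os : List (Int × Int × Int × Int)) (t s c : Int) (seeds : List Int)
    (h : ∀ p ∈ os, (p.2.1 ≤ t ↔ p.2.1 ≤ s)) : pvCons os t c seeds = pvCons os s c seeds := by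
  induction os generalizing c seeds with
  | nil => rfl
  | cons p ps ih =>
    have hp := h p (by simp)
    have hrest : ∀ q ∈ ps, (q.2.1 ≤ t ↔ q.2.1 ≤ s) := fun q hq => h q (by simp [hq])
    simp only [pvCons]
    by_cases h1 : c ≤ 0
    · simp [h1]
    · simp only [h1, if_false]
      by_cases h2 : p.2.1 ≤ t ∧ PySem.List.pyGetD seeds p.2.2.2 0 > 0
      · have h2' : p.2.1 ≤ s ∧ PySem.List.pyGetD seeds p.2.2.2 0 > 0 := ⟨hp.mp h2.1, h2.2⟩
        simp only [h2, h2', ih _ _ hrest]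
      · have h2' : ¬ (p.2.1 ≤ s ∧ PySem.List.pyGetD seeds p.2.2.2 0 > 0) := by
          intro hc; exact h2 ⟨hp.mpr hc.1, hc.2⟩
        simp only [if_neg h2, if_neg h2', ih _ _ hrest]


theorem pvWhileA_stop (L : List (Int × Int × Int × Int)) (power r : Int) (seeds : List Int)
    (h : power ≤ 0) : pvWhileA L power r seeds = (r, seeds) := by
  cases L with
  | nil => rfl
  | cons p ps => simp [pvWhileA, show ¬ power > 0 by omega]

theorem pvWhileA_eq (os : List (Int × Int × Int × Int)) (t : Int) (seeds0 : List Int) :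
    ∀ (power r : Int) (seeds : List Int),
    (∀ p ∈ os, 0 ≤ p.2.2.2 ∧ p.2.2.2 < (seeds.length : Int)) →
    (∀ p ∈ os, (PySem.List.pyGetD seeds0 p.2.2.2 0 ≤ 0 → PySem.List.pyGetD seeds p.2.2.2 0 ≤ 0)
        ∧ (0 < PySem.List.pyGetD seeds0 p.2.2.2 0 → 0 ≤ PySem.List.pyGetD seeds p.2.2.2 0)) →
    pvWhileA (os.filter (fun p => decide (p.2.1 ≤ t) && decide (PySem.List.pyGetD seeds0 p.2.2.2 0 > 0))) power r seeds
      = (r + (pvCons os t power seeds).1, (pvCons os t power seeds).2) := by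
  induction os with
  | nil => intro power r seeds _ _; simp [pvWhileA, pvCons]
  | cons p ps ih =>
    intro power r seeds hidx hinv
    have hip : 0 ≤ p.2.2.2 := (hidx p (by simp)).1
    have hiplen : p.2.2.2 < (seeds.length : Int) := (hidx p (by simp)).2
    by_cases hpow : power ≤ 0
    · rw [pvWhileA_stop _ _ _ _ hpow, pvCons_nonpos _ _ _ _ hpow]
      simp
    · have hpow' : power > 0 := by omega
      by_cases hpred : p.2.1 ≤ t ∧ 0 < PySem.List.pyGetD seeds0 p.2.2.2 0
      · rw [List.filter_cons_of_pos (by simpa using hpred)]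
        have hsd0 : 0 ≤ PySem.List.pyGetD seeds p.2.2.2 0 := (hinv p (by simp)).2 hpred.2
        by_cases hsd : 0 < PySem.List.pyGetD seeds p.2.2.2 0
        · have hcond : p.2.1 ≤ t ∧ PySem.List.pyGetD seeds p.2.2.2 0 > 0 := ⟨hpred.1, hsd⟩
          simp only [pvWhileA, pvCons, if_pos hpow', if_neg (show ¬ power ≤ 0 by omega), if_pos hcond]
          by_cases hge : PySem.List.pyGetD seeds p.2.2.2 0 ≥ power
          · have hlt : ¬ PySem.List.pyGetD seeds p.2.2.2 0 < power := by omega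
            simp only [if_pos hge, if_neg hlt]
            rw [pvWhileA_stop _ _ _ _ (by omega),
              pvCons_nonpos _ _ _ _ (by omega : power - power ≤ 0)]
            simp only [Prod.ext_iff]
            exact ⟨by ring, by trivial⟩
          · have hlt : PySem.List.pyGetD seeds p.2.2.2 0 < power := by omega
            simp only [if_neg hge, if_pos hlt, sub_self]
            have hbnd : ∀ q ∈ ps, 0 ≤ q.2.2.2 ∧ q.2.2.2 < ((PySem.List.pySetD seeds p.2.2.2 0).length : Int) := by
              intro q hq
              have := hidx q (by simp [hq])
              simpa [pv_length_setD] using this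
            have hinv' : ∀ q ∈ ps,
                (PySem.List.pyGetD seeds0 q.2.2.2 0 ≤ 0 →
                  PySem.List.pyGetD (PySem.List.pySetD seeds p.2.2.2 0) q.2.2.2 0 ≤ 0)
                ∧ (0 < PySem.List.pyGetD seeds0 q.2.2.2 0 →
                  0 ≤ PySem.List.pyGetD (PySem.List.pySetD seeds p.2.2.2 0) q.2.2.2 0) := by
              intro q hq
              by_cases he : q.2.2.2 = p.2.2.2
              · rw [he, pv_getD_setD_self _ _ _ hip hiplen]
                exact ⟨fun _ => le_refl 0, fun _ => le_refl 0⟩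
              · rw [pv_getD_setD_ne _ _ _ _ hip ((hidx q (by simp [hq])).1) he]
                exact hinv q (by simp [hq])
            rw [ih (power - PySem.List.pyGetD seeds p.2.2.2 0)
              (r + PySem.List.pyGetD seeds p.2.2.2 0 * p.2.2.1)
              (PySem.List.pySetD seeds p.2.2.2 0) hbnd hinv']
            simp only [Prod.ext_iff]
            exact ⟨by ring, by trivial⟩
        · -- current seeds are exactly 0: A visits and takes nothing, cons skips
          have hz : PySem.List.pyGetD seeds p.2.2.2 0 = 0 := by omega
          have hcond : ¬ (p.2.1 ≤ t ∧ PySem.List.pyGetD seeds p.2.2.2 0 > 0) := by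
            intro hc; omega
          simp only [pvWhileA, pvCons, if_pos hpow', if_neg (show ¬ power ≤ 0 by omega), hz]
          rw [pv_setD_zero_self _ _ hip hz]
          have := ih (power - 0) (r + 0 * p.2.2.1) seeds
            (fun q hq => hidx q (by simp [hq])) (fun q hq => hinv q (by simp [hq]))
          simpa using this
      · rw [List.filter_cons_of_neg (by simpa using hpred)]
        have hcond : ¬ (p.2.1 ≤ t ∧ PySem.List.pyGetD seeds p.2.2.2 0 > 0) := by
          intro hc
          apply hpred
          refine ⟨hc.1, ?_⟩
          by_contra h0
          have := (hinv p (by simp)).1 (by omega)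
          omega
        simp only [pvCons, if_neg (show ¬ power ≤ 0 by omega), if_neg hcond]
        exact ih power r seeds (fun q hq => hidx q (by simp [hq])) (fun q hq => hinv q (by simp [hq]))

-- one day of A, as port A's loop body computes it
def pvDayA (hv : List (Int × Int × Int × Int)) (x : Int) (acc : Int × List Int) (t : Int) :
    Int × List Int :=
  (acc.1 + (pvWhileA (hv.filter (fun p => decide (p.2.1 ≤ t) && decide (PySem.List.pyGetD acc.2 p.2.2.2 0 > 0))) x 0 acc.2).1,
   (pvWhileA (hv.filter (fun p => decide (p.2.1 ≤ t) && decide (PySem.List.pyGetD acc.2 p.2.2.2 0 > 0))) x 0 acc.2).2)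

def pvFoldA (hv : List (Int × Int × Int × Int)) (x : Int) (ts : List Int)
    (acc : Int × List Int) : Int × List Int :=
  ts.foldl (fun acc t => (acc.1 + (pvCons hv t x acc.2).1, (pvCons hv t x acc.2).2)) acc

theorem pvDayA_eq (hv : List (Int × Int × Int × Int)) (x : Int) (acc : Int × List Int) (t : Int)
    (hidx : ∀ p ∈ hv, 0 ≤ p.2.2.2 ∧ p.2.2.2 < (acc.2.length : Int)) :
    pvDayA hv x acc t = (acc.1 + (pvCons hv t x acc.2).1, (pvCons hv t x acc.2).2) := by
  unfold pvDayA
  rw [pvWhileA_eq hv t acc.2 x 0 acc.2 hidx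
    (fun q hq => ⟨fun h => h, fun _ => by omega⟩)]
  simp

theorem pvFoldBody_eq (hv : List (Int × Int × Int × Int)) (x : Int) :
    ∀ (ts : List Int) (acc : Int × List Int),
    (∀ p ∈ hv, 0 ≤ p.2.2.2 ∧ p.2.2.2 < (acc.2.length : Int)) →
    ts.foldl (pvDayA hv x) acc = pvFoldA hv x ts acc := by
  intro ts
  induction ts with
  | nil => intro acc _; rfl
  | cons t ts ih =>
    intro acc hidx
    have h1 := pvDayA_eq hv x acc t hidx
    simp only [List.foldl_cons, pvFoldA, h1]
    apply ih
    intro p hp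
    refine ⟨(hidx p hp).1, ?_⟩
    have := (hidx p hp).2
    simpa [pvCons_length] using this

theorem pv_days_eq (d : Int) :
    ((PySem.List.pyRange 1 (d + 1) 1).reverse).map (fun day => d - day)
      = PySem.List.pyRange 0 d 1 := by
  have h1 : PySem.List.pyRange d 0 (-1) = (PySem.List.pyRange (0 + 1) (d + 1) 1).reverse :=
    PySem.List.pyRange_neg_one_eq_reverse ..
  rw [show (0 : Int) + 1 = 1 by ring] at h1
  rw [← h1, PySem.List.pyRange_neg_one, PySem.List.pyRange_one, List.map_map]
  apply List.map_congr_left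
  intro k hk
  simp only [Function.comp_apply]
  omega


-- consuming capacity a then capacity b (same availability) = consuming a + b at once
theorem pvCons_add (os : List (Int × Int × Int × Int)) (t : Int) :
    ∀ (a b : Int) (seeds : List Int), 0 ≤ a → 0 ≤ b →
    (∀ p ∈ os, 0 ≤ p.2.2.2 ∧ p.2.2.2 < (seeds.length : Int)) →
    pvCons os t (a + b) seeds
      = ((pvCons os t a seeds).1 + (pvCons os t b (pvCons os t a seeds).2).1,
         (pvCons os t b (pvCons os t a seeds).2).2) := by
  induction os with
  | nil => intro a b seeds _ _ _; simp [pvCons]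
  | cons p ps ih =>
    intro a b seeds ha hb hidx
    have hip := (hidx p (by simp)).1
    have hiplen := (hidx p (by simp)).2
    have hidx' : ∀ q ∈ ps, 0 ≤ q.2.2.2 ∧ q.2.2.2 < (seeds.length : Int) :=
      fun q hq => hidx q (by simp [hq])
    by_cases ha0 : a ≤ 0
    · have ha' : a = 0 := by omega
      subst ha'
      rw [pvCons_nonpos _ _ _ _ (le_refl 0)]
      simp
    · by_cases hb0 : b ≤ 0
      · have hb' : b = 0 := by omega
        subst hb'
        rw [pvCons_nonpos _ _ 0 (pvCons (p :: ps) t a seeds).2 (le_refl 0)]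
        simp
      · have hab : ¬ (a + b ≤ 0) := by omega
        by_cases hcond : p.2.1 ≤ t ∧ PySem.List.pyGetD seeds p.2.2.2 0 > 0
        · by_cases hlt : PySem.List.pyGetD seeds p.2.2.2 0 < a
          · -- first pass exhausts the head plant
            have hlt' : PySem.List.pyGetD seeds p.2.2.2 0 < a + b := by omega
            simp only [pvCons, if_neg ha0, if_neg hab, if_pos hcond, if_pos hlt, if_pos hlt',
              sub_self]
            -- second pass skips the now-empty head
            have hz : PySem.List.pyGetD (PySem.List.pySetD seeds p.2.2.2 0) p.2.2.2 0 = 0 :=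
              pv_getD_setD_self _ _ _ hip hiplen
            have hz1 : PySem.List.pyGetD
                (pvCons ps t (a - PySem.List.pyGetD seeds p.2.2.2 0)
                  (PySem.List.pySetD seeds p.2.2.2 0)).2 p.2.2.2 0 ≤ 0 :=
              pvCons_nonpos_preserved _ _ _ _ _ (fun q hq => (hidx' q hq).1) hip (by omega)
            have hcond2 : ¬ (p.2.1 ≤ t ∧ PySem.List.pyGetD
                (pvCons ps t (a - PySem.List.pyGetD seeds p.2.2.2 0)
                  (PySem.List.pySetD seeds p.2.2.2 0)).2 p.2.2.2 0 > 0) := by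
              intro hc; omega
            simp only [if_neg hb0, if_neg hcond2]
            have hre : a + b - PySem.List.pyGetD seeds p.2.2.2 0
                = (a - PySem.List.pyGetD seeds p.2.2.2 0) + b := by ring
            rw [hre, ih (a - PySem.List.pyGetD seeds p.2.2.2 0) b
              (PySem.List.pySetD seeds p.2.2.2 0) (by omega) hb
              (fun q hq => by simpa [pv_length_setD] using hidx' q hq)]
            simp only [Prod.ext_iff]
            exact ⟨by ring, by trivial⟩
          · -- first pass takes a from the head plant
            have hrem : PySem.List.pyGetD (PySem.List.pySetD seeds p.2.2.2
                (PySem.List.pyGetD seeds p.2.2.2 0 - a)) p.2.2.2 0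
                = PySem.List.pyGetD seeds p.2.2.2 0 - a :=
              pv_getD_setD_self _ _ _ hip hiplen
            simp only [pvCons, if_neg ha0, if_neg hab, if_neg hb0, if_pos hcond, if_neg hlt,
              sub_self]
            simp only [pvCons_zero]
            simp only [hrem]
            by_cases hgt : 0 < PySem.List.pyGetD seeds p.2.2.2 0 - a
            · have hcond2 : p.2.1 ≤ t ∧ PySem.List.pyGetD seeds p.2.2.2 0 - a > 0 :=
                ⟨hcond.1, hgt⟩
              simp only [if_pos hcond2, pv_setD_setD _ _ _ _ hip]
              by_cases h2 : PySem.List.pyGetD seeds p.2.2.2 0 - a < b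
              · have h2' : PySem.List.pyGetD seeds p.2.2.2 0 < a + b := by omega
                simp only [if_pos h2, if_pos h2', sub_self]
                have hre : b - (PySem.List.pyGetD seeds p.2.2.2 0 - a)
                    = a + b - PySem.List.pyGetD seeds p.2.2.2 0 := by ring
                rw [hre]
                simp only [Prod.ext_iff]
                exact ⟨by ring, by trivial⟩
              · have h2' : ¬ PySem.List.pyGetD seeds p.2.2.2 0 < a + b := by omega
                simp only [if_neg h2, if_neg h2', sub_self]
                simp only [pvCons_zero]
                have hre2 : PySem.List.pyGetD seeds p.2.2.2 0 - a - b
                    = PySem.List.pyGetD seeds p.2.2.2 0 - (a + b) := by ring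
                rw [hre2]
                simp only [Prod.ext_iff]
                exact ⟨by ring, by trivial⟩
            · -- the head held exactly a seeds
              have heq : PySem.List.pyGetD seeds p.2.2.2 0 = a := by omega
              have hcond2 : ¬ (p.2.1 ≤ t ∧ PySem.List.pyGetD seeds p.2.2.2 0 - a > 0) := by
                intro hc; omega
              have h2' : PySem.List.pyGetD seeds p.2.2.2 0 < a + b := by omega
              simp only [heq, sub_self]
              simp only [if_pos (show a < a + b by omega),
                if_neg (show ¬ (p.2.1 ≤ t ∧ (0 : Int) > 0) from fun hc => absurd hc.2 (by omega))]
              simp only [sub_self]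
              have hre3 : a + b - a = b := by ring
              rw [hre3]
              simp only [Prod.ext_iff]
              exact ⟨by ring, by trivial⟩
        · -- head never available
          simp only [pvCons, if_neg ha0, if_neg hab, if_neg hb0, if_neg hcond]
          have hcond2 : ¬ (p.2.1 ≤ t ∧ PySem.List.pyGetD (pvCons ps t a seeds).2 p.2.2.2 0 > 0) := by
            intro hc
            apply hcond
            refine ⟨hc.1, ?_⟩
            by_contra h0
            have := pvCons_nonpos_preserved ps t a seeds p.2.2.2
              (fun q hq => (hidx' q hq).1) hip (by omega)
            omega
          simp only [if_neg hcond2]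
          exact ih a b seeds ha hb hidx'


theorem pvFoldA_cons (hv : List (Int × Int × Int × Int)) (x t : Int) (ts : List Int)
    (acc : Int × List Int) :
    pvFoldA hv x (t :: ts) acc
      = pvFoldA hv x ts (acc.1 + (pvCons hv t x acc.2).1, (pvCons hv t x acc.2).2) := rfl

theorem pvFoldA_append (hv : List (Int × Int × Int × Int)) (x : Int) (ts us : List Int)
    (acc : Int × List Int) :
    pvFoldA hv x (ts ++ us) acc = pvFoldA hv x us (pvFoldA hv x ts acc) :=
  List.foldl_append

theorem pvFoldA_dead (hv : List (Int × Int × Int × Int)) (x : Int) :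
    ∀ (ts : List Int) (acc : Int × List Int),
    (∀ t ∈ ts, ∀ p ∈ hv, ¬ p.2.1 ≤ t) → pvFoldA hv x ts acc = acc := by
  intro ts
  induction ts with
  | nil => intro acc _; rfl
  | cons t ts ih =>
    intro acc h
    rw [pvFoldA_cons, pvCons_nop hv t x acc.2 (h t (by simp))]
    simpa using ih acc (fun t' ht' => h t' (by simp [ht']))

theorem pvFoldA_const (hv : List (Int × Int × Int × Int)) (x : Int) :
    ∀ (ts : List Int) (s : Int) (acc : Int × List Int),
    (∀ t ∈ ts, ∀ p ∈ hv, (p.2.1 ≤ t ↔ p.2.1 ≤ s)) →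
    (∀ p ∈ hv, 0 ≤ p.2.2.2 ∧ p.2.2.2 < (acc.2.length : Int)) →
    pvFoldA hv x ts acc
      = (acc.1 + (pvCons hv s (x * (ts.length : Int)) acc.2).1,
         (pvCons hv s (x * (ts.length : Int)) acc.2).2) := by
  intro ts
  induction ts with
  | nil =>
    intro s acc _ _
    simp [pvFoldA, pvCons_zero]
  | cons t ts ih =>
    intro s acc hconst hidx
    rw [pvFoldA_cons, pvCons_congr_t hv t s x acc.2 (hconst t (by simp))]
    have hconst' : ∀ t' ∈ ts, ∀ p ∈ hv, (p.2.1 ≤ t' ↔ p.2.1 ≤ s) :=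
      fun t' ht' => hconst t' (by simp [ht'])
    by_cases hx : 0 ≤ x
    · have hxl : 0 ≤ x * (ts.length : Int) :=
        mul_nonneg hx (by positivity)
      have hadd := pvCons_add hv s x (x * (ts.length : Int)) acc.2 hx hxl hidx
      have hlen : x * (((t :: ts).length : Nat) : Int) = x + x * (ts.length : Int) := by
        simp only [List.length_cons]; push_cast; ring
      rw [hlen, hadd]
      rw [ih s _ hconst'
        (fun p hp => ⟨(hidx p hp).1, by simpa [pvCons_length] using (hidx p hp).2⟩)]
      simp only [Prod.ext_iff]
      exact ⟨by ring, by trivial⟩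
    · have hx0 : x ≤ 0 := by omega
      have hxl : x * (ts.length : Int) ≤ 0 := by
        have h1 : (0 : Int) ≤ (ts.length : Int) := by positivity
        nlinarith
      have hxl' : x * (((t :: ts).length : Nat) : Int) ≤ 0 := by
        have h1 : (0 : Int) ≤ (((t :: ts).length : Nat) : Int) := by positivity
        nlinarith
      rw [pvCons_nonpos hv s x acc.2 hx0]
      rw [ih s _ hconst' (fun p hp => ⟨(hidx p hp).1, by simpa using (hidx p hp).2⟩)]
      rw [pvCons_nonpos hv s (x * (ts.length : Int)) _ hxl,
        pvCons_nonpos hv s _ _ hxl']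
      simp


-- the effective availability day of a plant
def pvClamp (p : Int × Int × Int × Int) : Int := if p.2.1 > 0 then p.2.1 else 0

theorem pv_clamp_le (p : Int × Int × Int × Int) (t : Int) (ht : 0 ≤ t) :
    (p.2.1 ≤ t ↔ pvClamp p ≤ t) := by
  unfold pvClamp
  split_ifs with h <;> omega

theorem pv_hv_facts (plants : List (Int × Int × Int)) :
    ∀ p ∈ PySem.List.sorted ((PySem.List.enumerate plants).map
        (fun p => (p.2.1, p.2.2.1, p.2.2.2, p.1))) (fun s => s.2.2.1) true,
      (0 ≤ p.2.2.2 ∧ p.2.2.2 < (plants.length : Int)) ∧ (p.1, p.2.1, p.2.2.1) ∈ plants := by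
  intro p hp
  rw [PySem.List.mem_sorted] at hp
  obtain ⟨q, hq, rfl⟩ := List.mem_map.mp hp
  rw [PySem.List.mem_enumerate_iff] at hq
  obtain ⟨k, hk, rfl⟩ := hq
  refine ⟨⟨by simp, by simp; exact_mod_cast hk⟩, ?_⟩
  simp only [Prod.mk.eta]; exact List.getElem_mem hk

theorem pv_seeds_eq (plants : List (Int × Int × Int)) :
    ((PySem.List.enumerate plants).map (fun p => (p.2.1, p.2.2.1, p.2.2.2, p.1))).map
        (fun p => p.1)
      = plants.map (fun p => p.1) := by
  rw [List.map_map]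
  conv_rhs => rw [← PySem.List.map_snd_enumerate plants 0, List.map_map]
  exact List.map_congr_left (fun q _ => rfl)

theorem pv_mem_starts (d : Int) (plants : List (Int × Int × Int)) (a : Int) :
    a ∈ PySem.List.sorted (PySem.Set.ofList ((plants.map
        (fun p => if p.2.1 > 0 then p.2.1 else 0)).filter (fun a => a < d))) (fun a => a) false
      ↔ ((∃ q ∈ plants, a = if q.2.1 > 0 then q.2.1 else 0) ∧ a < d) := by
  rw [PySem.List.mem_sorted, PySem.Set.mem_ofList, List.mem_filter]
  simp only [List.mem_map, decide_eq_true_eq]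
  constructor
  · rintro ⟨⟨q, hq, hqe⟩, hlt⟩
    exact ⟨⟨q, hq, hqe.symm⟩, hlt⟩
  · rintro ⟨⟨q, hq, hqe⟩, hlt⟩
    exact ⟨⟨q, hq, hqe.symm⟩, hlt⟩

-- the big segment induction: simulating all days from s to d equals B's batched loop
theorem pv_segs (d x : Int) (hv : List (Int × Int × Int × Int)) :
    ∀ (rest : List Int) (s : Int) (acc : Int × List Int),
    List.Pairwise (· < ·) (s :: rest) →
    (∀ b ∈ s :: rest, 0 ≤ b ∧ b < d) →
    (∀ p ∈ hv, s ≤ pvClamp p → pvClamp p < d → pvClamp p ∈ s :: rest) →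
    (∀ p ∈ hv, 0 ≤ p.2.2.2 ∧ p.2.2.2 < (acc.2.length : Int)) →
    pvFoldA hv x (PySem.List.pyRange s d 1) acc = pvSegB d x hv (s :: rest) acc.1 acc.2 := by
  intro rest
  induction rest with
  | nil =>
    intro s acc _ hbnd hcomp hidx
    have hs0 : 0 ≤ s := (hbnd s (by simp)).1
    have hsd : s < d := (hbnd s (by simp)).2
    have hconst : ∀ t ∈ PySem.List.pyRange s d 1, ∀ p ∈ hv, (p.2.1 ≤ t ↔ p.2.1 ≤ s) := by
      intro t ht p hp
      rw [PySem.List.mem_pyRange_one] at ht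
      constructor
      · intro h
        rw [pv_clamp_le p t (by omega)] at h
        by_cases hcs : pvClamp p ≤ s
        · rw [pv_clamp_le p s (by omega)]; exact hcs
        · have := hcomp p hp (by omega) (by omega)
          simp at this
          omega
      · intro h; omega
    rw [pvFoldA_const hv x _ s acc hconst hidx]
    have hlen : x * (((PySem.List.pyRange s d 1).length : Nat) : Int) = x * (d - s) := by
      rw [PySem.List.length_pyRange_one]
      rw [Int.toNat_of_nonneg (by omega)]
    rw [hlen]
    simp only [pvSegB, pvConsB_eq]
  | cons s2 rest' ih =>
    intro s acc hsort hbnd hcomp hidx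
    have hs0 : 0 ≤ s := (hbnd s (by simp)).1
    have hsd : s < d := (hbnd s (by simp)).2
    have hss2 : s < s2 := (List.pairwise_cons.mp hsort).1 s2 (by simp)
    have hs2d : s2 < d := (hbnd s2 (by simp)).2
    have hrest' : ∀ b ∈ rest', s2 < b :=
      (List.pairwise_cons.mp (List.pairwise_cons.mp hsort).2).1
    rw [PySem.List.pyRange_one_append s s2 d (by omega) (by omega), pvFoldA_append]
    have hconst : ∀ t ∈ PySem.List.pyRange s s2 1, ∀ p ∈ hv, (p.2.1 ≤ t ↔ p.2.1 ≤ s) := by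
      intro t ht p hp
      rw [PySem.List.mem_pyRange_one] at ht
      constructor
      · intro h
        rw [pv_clamp_le p t (by omega)] at h
        by_cases hcs : pvClamp p ≤ s
        · rw [pv_clamp_le p s (by omega)]; exact hcs
        · have hin := hcomp p hp (by omega) (by omega)
          simp only [List.mem_cons] at hin
          rcases hin with h1 | h1 | h1
          · omega
          · omega
          · have := hrest' _ h1; omega
      · intro h; omega
    rw [pvFoldA_const hv x _ s acc hconst hidx]
    have hlen : x * (((PySem.List.pyRange s s2 1).length : Nat) : Int) = x * (s2 - s) := by
      rw [PySem.List.length_pyRange_one, Int.toNat_of_nonneg (by omega)]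
    rw [hlen]
    have hcomp' : ∀ p ∈ hv, s2 ≤ pvClamp p → pvClamp p < d → pvClamp p ∈ s2 :: rest' := by
      intro p hp h1 h2
      have := hcomp p hp (by omega) h2
      simp only [List.mem_cons] at this ⊢
      rcases this with h3 | h3
      · omega
      · exact h3
    have hidx' : ∀ p ∈ hv, 0 ≤ p.2.2.2 ∧
        p.2.2.2 < (((pvCons hv s (x * (s2 - s)) acc.2).2).length : Int) := by
      intro p hp
      refine ⟨(hidx p hp).1, ?_⟩
      rw [pvCons_length]
      exact (hidx p hp).2
    have hrec := ih s2
      (acc.1 + (pvCons hv s (x * (s2 - s)) acc.2).1, (pvCons hv s (x * (s2 - s)) acc.2).2)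
      (List.pairwise_cons.mp hsort).2
      (fun b hb => hbnd b (by simp [hb]))
      hcomp' hidx'
    rw [hrec]
    simp only [pvSegB, pvConsB_eq]

-- A = B, unconditionally on the ports
theorem pv_main (d n x : Int) (plants : List (Int × Int × Int)) :
    run_solution d n x plants = run_solution_alt d n x plants := by
  have hfacts := pv_hv_facts plants
  show (((PySem.List.pyRange 1 (d + 1) 1).reverse).foldl
      (fun (acc : Int × List Int) day =>
        pvDayA (PySem.List.sorted ((PySem.List.enumerate plants).map
          (fun p => (p.2.1, p.2.2.1, p.2.2.2, p.1))) (fun s => s.2.2.1) true) x acc (d - day))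
      (0, ((PySem.List.enumerate plants).map
        (fun p => (p.2.1, p.2.2.1, p.2.2.2, p.1))).map (fun p => p.1))).1
    = (pvSegB d x (PySem.List.sorted ((PySem.List.enumerate plants).map
          (fun p => (p.2.1, p.2.2.1, p.2.2.2, p.1))) (fun s => s.2.2.1) true)
        (PySem.List.sorted (PySem.Set.ofList ((plants.map
          (fun p => if p.2.1 > 0 then p.2.1 else 0)).filter (fun a => a < d))) (fun a => a) false)
        0 (plants.map (fun p => p.1))).1
  rw [← List.foldl_map, pv_days_eq d, pv_seeds_eq plants]
  have hlenseeds : (plants.map (fun p => p.1)).length = plants.length := List.length_map ..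
  have hidx0 : ∀ p ∈ PySem.List.sorted ((PySem.List.enumerate plants).map
      (fun p => (p.2.1, p.2.2.1, p.2.2.2, p.1))) (fun s => s.2.2.1) true,
      0 ≤ p.2.2.2 ∧ p.2.2.2 < (((0 : Int), plants.map (fun p => p.1)).2.length : Int) := by
    intro p hp
    refine ⟨(hfacts p hp).1.1, ?_⟩
    simp only [hlenseeds]
    exact (hfacts p hp).1.2
  rw [pvFoldBody_eq _ x _ _ hidx0]
  have hclampmem : ∀ p ∈ PySem.List.sorted ((PySem.List.enumerate plants).map
      (fun p => (p.2.1, p.2.2.1, p.2.2.2, p.1))) (fun s => s.2.2.1) true,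
      pvClamp p < d → pvClamp p ∈ PySem.List.sorted (PySem.Set.ofList ((plants.map
        (fun p => if p.2.1 > 0 then p.2.1 else 0)).filter (fun a => a < d))) (fun a => a) false := by
    intro p hp hlt
    rw [pv_mem_starts]
    exact ⟨⟨(p.1, p.2.1, p.2.2.1), (hfacts p hp).2, rfl⟩, hlt⟩
  have hpair := PySem.List.sorted_ofList_pairwise_lt
    (xs := (plants.map (fun p => if p.2.1 > 0 then p.2.1 else 0)).filter (fun a => a < d))
  have hclamp0 : ∀ a : Int, (∃ q ∈ plants, a = if q.2.1 > 0 then q.2.1 else 0) → 0 ≤ a := by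
    rintro a ⟨q, _, rfl⟩
    split_ifs with h <;> omega
  cases hstarts : PySem.List.sorted (PySem.Set.ofList ((plants.map
      (fun p => if p.2.1 > 0 then p.2.1 else 0)).filter (fun a => a < d))) (fun a => a) false with
  | nil =>
    have hdead : ∀ t ∈ PySem.List.pyRange 0 d 1, ∀ p ∈ PySem.List.sorted
        ((PySem.List.enumerate plants).map (fun p => (p.2.1, p.2.2.1, p.2.2.2, p.1)))
        (fun s => s.2.2.1) true, ¬ p.2.1 ≤ t := by
      intro t ht p hp h
      rw [PySem.List.mem_pyRange_one] at ht
      rw [pv_clamp_le p t (by omega)] at h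
      have := hclampmem p hp (by omega)
      rw [hstarts] at this
      simp at this
    rw [pvFoldA_dead _ _ _ _ hdead]
    simp [pvSegB]
  | cons s0 rest =>
    have hmem0 : s0 ∈ PySem.List.sorted (PySem.Set.ofList ((plants.map
        (fun p => if p.2.1 > 0 then p.2.1 else 0)).filter (fun a => a < d))) (fun a => a) false := by
      rw [hstarts]; simp
    have h0 := (pv_mem_starts d plants s0).mp hmem0
    have hs00 : 0 ≤ s0 := hclamp0 s0 h0.1
    have hs0d : s0 < d := h0.2
    rw [hstarts] at hpair
    have hrestgt : ∀ b ∈ rest, s0 < b := (List.pairwise_cons.mp hpair).1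
    rw [PySem.List.pyRange_one_append 0 s0 d (by omega) (by omega), pvFoldA_append]
    have hdead : ∀ t ∈ PySem.List.pyRange 0 s0 1, ∀ p ∈ PySem.List.sorted
        ((PySem.List.enumerate plants).map (fun p => (p.2.1, p.2.2.1, p.2.2.2, p.1)))
        (fun s => s.2.2.1) true, ¬ p.2.1 ≤ t := by
      intro t ht p hp h
      rw [PySem.List.mem_pyRange_one] at ht
      rw [pv_clamp_le p t (by omega)] at h
      have hin := hclampmem p hp (by omega)
      rw [hstarts] at hin
      simp only [List.mem_cons] at hin
      rcases hin with h1 | h1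
      · omega
      · have := hrestgt _ h1; omega
    rw [pvFoldA_dead _ _ _ _ hdead]
    have hbnd : ∀ b ∈ s0 :: rest, 0 ≤ b ∧ b < d := by
      intro b hb
      have hmem : b ∈ PySem.List.sorted (PySem.Set.ofList ((plants.map
          (fun p => if p.2.1 > 0 then p.2.1 else 0)).filter (fun a => a < d))) (fun a => a) false := by
        rw [hstarts]; exact hb
      have hbf := (pv_mem_starts d plants b).mp hmem
      exact ⟨hclamp0 b hbf.1, hbf.2⟩
    have hcomp : ∀ p ∈ PySem.List.sorted ((PySem.List.enumerate plants).map
        (fun p => (p.2.1, p.2.2.1, p.2.2.2, p.1))) (fun s => s.2.2.1) true,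
        s0 ≤ pvClamp p → pvClamp p < d → pvClamp p ∈ s0 :: rest := by
      intro p hp _ h2
      have := hclampmem p hp h2
      rwa [hstarts] at this
    exact congrArg Prod.fst
      (pv_segs d x _ rest s0 (0, plants.map (fun p => p.1)) hpair hbnd hcomp hidx0)

-- ===== VERDICT (by name: the statement is the Claim_ definition above) =====
theorem run_solution_spec : Claim_equal_run_solution := by
  intro d n x plants _ _
  show run_solution d n x plants = run_solution_alt d n x plants
  exact pv_main d n x plants
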